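-- pv_equiv track=rewrite | github.com/shaiknazeer14/AiFeedViz | feedviz/tools/nlp_analyzer.py | get_topic_clusters
-- ===== SOURCE A (Python) =====
-- def get_topic_clusters(keywords: list) -> list:
--     topics = {
--         "pacing": {"fast", "slow", "rush", "speed", "pace"},
--         "clarity": {"clear", "confused", "unclear", "explain", "understand"},
--         "engagement": {"boring", "engaging", "interesting", "monotonous", "enthusiastic"},
--         "helpfulness": {"help", "support", "approachable", "available"},
--         "knowledge": {"knowledge", "expert", "subject", "concept"}
--     }
--
--     input_words = set(keywords)
--
--     result = [
--         topic
--         for topic, topic_words in topics.items()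
--         if input_words.intersection(topic_words)
--     ]
--
--     return result
-- ===== SOURCE B (Python) =====
-- def get_topic_clusters(keywords: list) -> list:
--     topic_order = ["pacing", "clarity", "engagement", "helpfulness", "knowledge"]
--     # precomputed inverted index (the topic word sets are disjoint, so keys are unique)
--     word_to_topic = {
--         "fast": "pacing", "slow": "pacing", "rush": "pacing", "speed": "pacing", "pace": "pacing",
--         "clear": "clarity", "confused": "clarity", "unclear": "clarity", "explain": "clarity", "understand": "clarity",
--         "boring": "engagement", "engaging": "engagement", "interesting": "engagement", "monotonous": "engagement", "enthusiastic": "engagement",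
--         "help": "helpfulness", "support": "helpfulness", "approachable": "helpfulness", "available": "helpfulness",
--         "knowledge": "knowledge", "expert": "knowledge", "subject": "knowledge", "concept": "knowledge",
--     }
--     matched = set()
--     for word in set(keywords):
--         topic = word_to_topic.get(word)
--         if topic is not None:
--             matched.add(topic)
--     return [topic for topic in topic_order if topic in matched]
-- ===== Notes on version B (the rewrite author's own statement) =====
-- stated objective: alternative
-- what changed: Replaces the five per-topic set intersections with a precomputed word-to-topic inverted index, one lookup pass over the deduplicated keywords building a matched-topic set, and a final filter of the topic names in dict order.
import Mathlib
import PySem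

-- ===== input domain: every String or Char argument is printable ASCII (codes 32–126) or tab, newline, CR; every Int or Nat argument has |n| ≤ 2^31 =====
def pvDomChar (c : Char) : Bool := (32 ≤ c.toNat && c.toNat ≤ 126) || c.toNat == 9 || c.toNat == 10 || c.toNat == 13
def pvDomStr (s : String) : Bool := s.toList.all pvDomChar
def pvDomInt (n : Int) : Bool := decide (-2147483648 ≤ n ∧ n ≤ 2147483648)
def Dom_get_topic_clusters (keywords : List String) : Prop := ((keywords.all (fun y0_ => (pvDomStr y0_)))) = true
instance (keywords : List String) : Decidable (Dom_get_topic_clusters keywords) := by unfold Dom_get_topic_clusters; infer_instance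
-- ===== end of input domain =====

-- B replaces A's five per-topic set intersections with a hardcoded inverted word-to-topic index,
-- one lookup pass over the deduplicated keywords, and a filter of the topic names in dict order.


-- ===== PORT A =====
-- A's literal topics dict: topic name ↦ its word set (a Python set literal; only tested for
-- nonempty intersection, so its iteration order never matters)
def pvTopicsA : List (String × List String) :=
  [("pacing", ["fast", "slow", "rush", "speed", "pace"]),
   ("clarity", ["clear", "confused", "unclear", "explain", "understand"]),
   ("engagement", ["boring", "engaging", "interesting", "monotonous", "enthusiastic"]),
   ("helpfulness", ["help", "support", "approachable", "available"]),
   ("knowledge", ["knowledge", "expert", "subject", "concept"])]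

def get_topic_clusters (keywords : List String) : List String :=
  let input_words : PySem.Set String := PySem.Set.ofList keywords
  (pvTopicsA.filter
    (fun p => !(PySem.Set.inter input_words (PySem.Set.ofList p.2)).isEmpty)).map Prod.fst

-- ===== PORT B =====
def pvTopicOrder : List String :=
  ["pacing", "clarity", "engagement", "helpfulness", "knowledge"]

-- B's hardcoded inverted index: word ↦ its topic (a Python dict literal with unique keys)
def pvWordToTopic : PySem.Dict String String :=
  PySem.Dict.mk
    [("fast", "pacing"), ("slow", "pacing"), ("rush", "pacing"), ("speed", "pacing"), ("pace", "pacing"),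
     ("clear", "clarity"), ("confused", "clarity"), ("unclear", "clarity"), ("explain", "clarity"), ("understand", "clarity"),
     ("boring", "engagement"), ("engaging", "engagement"), ("interesting", "engagement"), ("monotonous", "engagement"), ("enthusiastic", "engagement"),
     ("help", "helpfulness"), ("support", "helpfulness"), ("approachable", "helpfulness"), ("available", "helpfulness"),
     ("knowledge", "knowledge"), ("expert", "knowledge"), ("subject", "knowledge"), ("concept", "knowledge")]

-- B's loop: for word in set(keywords): add word_to_topic.get(word) to matched if present
-- (matched is only tested for membership afterwards, so set iteration order never matters)
def pvMatched (keywords : List String) : PySem.Set String :=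
  (PySem.Set.ofList keywords).foldl
    (fun m w =>
      match pvWordToTopic.get? w with
      | some t => m.add t
      | none => m)
    PySem.Set.empty

def get_topic_clusters_alt (keywords : List String) : List String :=
  pvTopicOrder.filter (fun t => (pvMatched keywords).contains t)

-- ===== PRECONDITION & SPEC =====
def Spec_get_topic_clusters (keywords : List String) (out : List String) : Prop := out = get_topic_clusters_alt keywords
instance (keywords : List String) (out : List String) : Decidable (Spec_get_topic_clusters keywords out) := by unfold Spec_get_topic_clusters; infer_instance

-- ===== CLAIM (what is proved, stated in full; the proofs are below) =====
def Claim_equal_get_topic_clusters : Prop := ∀ (keywords : List String), Dom_get_topic_clusters keywords → Spec_get_topic_clusters keywords (get_topic_clusters keywords)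

-- ===== LEMMAS AND PROOFS =====

-- a block of index entries all mapping to the same topic: lookup is a membership test
lemma pv_get?_mk_block (ws : List String) (t : String)
    (rest : List (String × String)) (w : String) :
    (PySem.Dict.mk (ws.map (fun w' => (w', t)) ++ rest)).get? w
      = if w ∈ ws then some t else (PySem.Dict.mk rest).get? w := by
  induction ws with
  | nil => simp
  | cons u ws ih =>
    simp only [List.map_cons, List.cons_append, PySem.Dict.get?_mk_cons, ih, List.mem_cons]
    by_cases h1 : u = w <;> by_cases h2 : w ∈ ws <;> simp [h1, h2]
    exact fun h => absurd h1 (by simp [h])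

-- the flattened index looks up the first topic whose word list holds w
lemma pv_get?_mk_flat (l : List (String × List String)) (w : String) :
    (PySem.Dict.mk (l.flatMap (fun p => p.2.map (fun w' => (w', p.1))))).get? w
      = match l.find? (fun p => p.2.contains w) with
        | some p => some p.1
        | none => none := by
  induction l with
  | nil => simp [PySem.Dict.get?]
  | cons p l ih =>
    rw [List.flatMap_cons, pv_get?_mk_block, List.find?_cons]
    by_cases h : w ∈ p.2 <;> simp [h, ih]

-- B's hardcoded index IS the flattening of A's topics table
lemma pv_lookup_eq_find (w : String) :
    pvWordToTopic.get? w
      = match pvTopicsA.find? (fun p => p.2.contains w) with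
        | some p => some p.1
        | none => none := by
  have e : pvWordToTopic
      = PySem.Dict.mk (pvTopicsA.flatMap (fun p => p.2.map (fun w' => (w', p.1)))) := rfl
  rw [e, pv_get?_mk_flat]

lemma pv_lk_pacing (w : String) :
    pvWordToTopic.get? w = some "pacing" ↔ w ∈ (["fast", "slow", "rush", "speed", "pace"] : List String) := by
  rw [pv_lookup_eq_find]
  simp only [pvTopicsA, List.find?_cons]
  by_cases h1 : w ∈ (["fast","slow","rush","speed","pace"] : List String) <;>
  by_cases h2 : w ∈ (["clear","confused","unclear","explain","understand"] : List String) <;>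
  by_cases h3 : w ∈ (["boring","engaging","interesting","monotonous","enthusiastic"] : List String) <;>
  by_cases h4 : w ∈ (["help","support","approachable","available"] : List String) <;>
  by_cases h5 : w ∈ (["knowledge","expert","subject","concept"] : List String) <;>
  simp_all

lemma pv_lk_clarity (w : String) :
    pvWordToTopic.get? w = some "clarity" ↔ w ∈ (["clear", "confused", "unclear", "explain", "understand"] : List String) := by
  rw [pv_lookup_eq_find]
  simp only [pvTopicsA, List.find?_cons]
  by_cases h1 : w ∈ (["fast","slow","rush","speed","pace"] : List String) <;>
  by_cases h2 : w ∈ (["clear","confused","unclear","explain","understand"] : List String) <;>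
  by_cases h3 : w ∈ (["boring","engaging","interesting","monotonous","enthusiastic"] : List String) <;>
  by_cases h4 : w ∈ (["help","support","approachable","available"] : List String) <;>
  by_cases h5 : w ∈ (["knowledge","expert","subject","concept"] : List String) <;>
  simp_all <;>
  (try (rcases h1 with rfl|rfl|rfl|rfl|rfl)) <;>
  simp_all

lemma pv_lk_engagement (w : String) :
    pvWordToTopic.get? w = some "engagement" ↔ w ∈ (["boring", "engaging", "interesting", "monotonous", "enthusiastic"] : List String) := by
  rw [pv_lookup_eq_find]
  simp only [pvTopicsA, List.find?_cons]
  by_cases h1 : w ∈ (["fast","slow","rush","speed","pace"] : List String) <;>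
  by_cases h2 : w ∈ (["clear","confused","unclear","explain","understand"] : List String) <;>
  by_cases h3 : w ∈ (["boring","engaging","interesting","monotonous","enthusiastic"] : List String) <;>
  by_cases h4 : w ∈ (["help","support","approachable","available"] : List String) <;>
  by_cases h5 : w ∈ (["knowledge","expert","subject","concept"] : List String) <;>
  simp_all <;>
  (try (rcases h1 with rfl|rfl|rfl|rfl|rfl)) <;>
  (try (rcases h2 with rfl|rfl|rfl|rfl|rfl)) <;>
  simp_all

lemma pv_lk_helpfulness (w : String) :
    pvWordToTopic.get? w = some "helpfulness" ↔ w ∈ (["help", "support", "approachable", "available"] : List String) := by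
  rw [pv_lookup_eq_find]
  simp only [pvTopicsA, List.find?_cons]
  by_cases h1 : w ∈ (["fast","slow","rush","speed","pace"] : List String) <;>
  by_cases h2 : w ∈ (["clear","confused","unclear","explain","understand"] : List String) <;>
  by_cases h3 : w ∈ (["boring","engaging","interesting","monotonous","enthusiastic"] : List String) <;>
  by_cases h4 : w ∈ (["help","support","approachable","available"] : List String) <;>
  by_cases h5 : w ∈ (["knowledge","expert","subject","concept"] : List String) <;>
  simp_all <;>
  (try (rcases h1 with rfl|rfl|rfl|rfl|rfl)) <;>
  (try (rcases h2 with rfl|rfl|rfl|rfl|rfl)) <;>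
  (try (rcases h3 with rfl|rfl|rfl|rfl|rfl)) <;>
  simp_all

lemma pv_lk_knowledge (w : String) :
    pvWordToTopic.get? w = some "knowledge" ↔ w ∈ (["knowledge", "expert", "subject", "concept"] : List String) := by
  rw [pv_lookup_eq_find]
  simp only [pvTopicsA, List.find?_cons]
  by_cases h1 : w ∈ (["fast","slow","rush","speed","pace"] : List String) <;>
  by_cases h2 : w ∈ (["clear","confused","unclear","explain","understand"] : List String) <;>
  by_cases h3 : w ∈ (["boring","engaging","interesting","monotonous","enthusiastic"] : List String) <;>
  by_cases h4 : w ∈ (["help","support","approachable","available"] : List String) <;>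
  by_cases h5 : w ∈ (["knowledge","expert","subject","concept"] : List String) <;>
  simp_all <;>
  (try (rcases h1 with rfl|rfl|rfl|rfl|rfl)) <;>
  (try (rcases h2 with rfl|rfl|rfl|rfl|rfl)) <;>
  (try (rcases h3 with rfl|rfl|rfl|rfl|rfl)) <;>
  (try (rcases h4 with rfl|rfl|rfl|rfl)) <;>
  simp_all

-- membership in the matched set built by B's lookup loop
lemma pv_mem_fold_lookup (S : List String) (m0 : PySem.Set String) (t : String) :
    t ∈ S.foldl
      (fun m w =>
        match pvWordToTopic.get? w with
        | some u => m.add u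
        | none => m) m0 ↔
    t ∈ m0 ∨ ∃ w ∈ S, pvWordToTopic.get? w = some t := by
  induction S generalizing m0 with
  | nil => simp
  | cons w S ih =>
    simp only [List.foldl_cons]
    cases h : pvWordToTopic.get? w with
    | none => simp [h, ih]
    | some u =>
      rw [ih]
      simp only [PySem.Set.mem_add, List.mem_cons]
      constructor
      · rintro ((hm | ht) | ⟨x, hx, he⟩)
        · exact Or.inl hm
        · exact Or.inr ⟨w, Or.inl rfl, by rw [h, ht]⟩
        · exact Or.inr ⟨x, Or.inr hx, he⟩
      · rintro (hm | ⟨x, (rfl | hx), he⟩)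
        · exact Or.inl (Or.inl hm)
        · exact Or.inl (Or.inr (Option.some.inj (h.symm.trans he)).symm)
        · exact Or.inr ⟨x, hx, he⟩

-- A's nonempty-intersection test agrees with B's matched-set test for each topic
lemma pv_bridge (ks : List String) (t : String) (ws : List String)
    (h : ∀ w, pvWordToTopic.get? w = some t ↔ w ∈ ws) :
    (!(PySem.Set.inter (PySem.Set.ofList ks) (PySem.Set.ofList ws)).isEmpty)
      = (pvMatched ks).contains t := by
  apply Bool.coe_iff_coe.mp
  have hL : (!(PySem.Set.inter (PySem.Set.ofList ks) (PySem.Set.ofList ws)).isEmpty) = true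
      ↔ ∃ w ∈ ks, w ∈ ws := by
    simp [PySem.Set.inter, List.filter_eq_nil_iff, PySem.Set.contains, PySem.Set.mem_ofList]
  have hR : ((pvMatched ks).contains t = true) ↔ ∃ w ∈ ks, w ∈ ws := by
    simp only [PySem.Set.contains, List.contains_iff_mem]
    rw [pvMatched, pv_mem_fold_lookup]
    constructor
    · rintro (hm | ⟨w, hw, he⟩)
      · simp [PySem.Set.empty] at hm
      · exact ⟨w, (PySem.Set.mem_ofList ks w).mp hw, (h w).mp he⟩
    · rintro ⟨w, hw, hws⟩
      exact Or.inr ⟨w, (PySem.Set.mem_ofList ks w).mpr hw, (h w).mpr hws⟩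
  rw [hL, hR]

lemma pv_map_fst_filter (l : List (String × List String))
    (p : String × List String → Bool) (q : String → Bool)
    (h : ∀ x ∈ l, p x = q x.1) :
    (l.filter p).map Prod.fst = (l.map Prod.fst).filter q := by
  induction l with
  | nil => rfl
  | cons x l ih =>
    have hx := h x (by simp)
    simp only [List.filter_cons, List.map_cons, hx]
    cases q x.1 <;> simp [ih (fun y hy => h y (by simp [hy]))]

-- ===== VERDICT (by name: the statement is the Claim_ definition above) =====
theorem get_topic_clusters_spec : Claim_equal_get_topic_clusters := by
  intro ks _
  show get_topic_clusters ks = get_topic_clusters_alt ks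
  rw [get_topic_clusters, get_topic_clusters_alt]
  have hord : pvTopicOrder = pvTopicsA.map Prod.fst := rfl
  rw [hord]
  apply pv_map_fst_filter
  intro x hx
  simp only [pvTopicsA, List.mem_cons, List.not_mem_nil, or_false] at hx
  rcases hx with rfl | rfl | rfl | rfl | rfl
  · exact pv_bridge ks "pacing" _ pv_lk_pacing
  · exact pv_bridge ks "clarity" _ pv_lk_clarity
  · exact pv_bridge ks "engagement" _ pv_lk_engagement
  · exact pv_bridge ks "helpfulness" _ pv_lk_helpfulness
  · exact pv_bridge ks "knowledge" _ pv_lk_knowledge
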